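-- pv_equiv track=rewrite | github.com/Shockn/FC_2019-02 | aula6Karla02.py | VetCheck
-- ===== SOURCE A (Python) =====
-- def VetCheck(vet):
--     vet2=[]
--     backup=vet
--     for i in range(0, len(vet)):
--         result=False
--         for j in range(i+1, len(vet)):
--             if vet[i]==vet[j]:
--                 result=True
--         if result==False:
--             vet2.append(vet[i])
--     #vet2.sort()
--     return(vet2)
-- ===== SOURCE B (Python) =====
-- def VetCheck(vet):
--     # Backward pass: an element stays iff it has no later duplicate,
--     # i.e. it is the last occurrence of its value.
--     seen = set()
--     out = []
--     for x in reversed(vet):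
--         if x not in seen:
--             seen.add(x)
--             out.append(x)
--     out.reverse()
--     return out
-- ===== Notes on version B (the rewrite author's own statement) =====
-- stated objective: faster
-- what changed: Replaced the O(n^2) nested index scan (for each i, scan j>i for a duplicate) by a single backward pass with a hash set of seen values, collecting last occurrences and reversing.
import Mathlib
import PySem

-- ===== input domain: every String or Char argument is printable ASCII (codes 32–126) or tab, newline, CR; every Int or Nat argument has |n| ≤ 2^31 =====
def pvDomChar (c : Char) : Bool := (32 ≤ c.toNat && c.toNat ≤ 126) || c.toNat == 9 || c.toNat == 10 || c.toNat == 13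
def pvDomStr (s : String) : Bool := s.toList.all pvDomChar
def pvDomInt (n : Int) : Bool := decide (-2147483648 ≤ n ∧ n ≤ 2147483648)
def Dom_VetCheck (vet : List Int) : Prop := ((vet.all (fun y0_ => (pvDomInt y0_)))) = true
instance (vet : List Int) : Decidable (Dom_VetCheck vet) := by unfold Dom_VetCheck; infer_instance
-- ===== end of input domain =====

-- B replaces A's O(n^2) nested index scan by a single backward pass with a set of seen values (keep last occurrences), then reverses.

-- ===== PORT A =====
-- inner j-loop of A: 'result=False; for j in range(i+1,len(vet)): if vet[i]==vet[j]: result=True'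
def innerA (vet : List Int) (i : Int) : Bool :=
  (PySem.List.pyRange (i + 1) vet.length 1).foldl
    (fun result j =>
      if PySem.List.pyGetD vet i 0 = PySem.List.pyGetD vet j 0 then true else result)
    false

-- outer i-loop of A: append vet[i] to vet2 when result is False
def VetCheck (vet : List Int) : List Int :=
  (PySem.List.pyRange 0 vet.length 1).foldl
    (fun vet2 i => if innerA vet i = false then vet2 ++ [PySem.List.pyGetD vet i 0] else vet2)
    []

-- ===== PORT B =====
-- literal port of B: fold over reversed list with (seen set, out) state, then reverse out
def VetCheck_alt (vet : List Int) : List Int :=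
  (vet.reverse.foldl
    (fun (st : PySem.Set Int × List Int) x =>
      if PySem.Set.contains st.1 x then st else (PySem.Set.add st.1 x, st.2 ++ [x]))
    (PySem.Set.empty, [])).2.reverse

-- ===== PRECONDITION & SPEC =====
def Spec_VetCheck (vet : List Int) (out : List Int) : Prop := out = VetCheck_alt vet
instance (vet : List Int) (out : List Int) : Decidable (Spec_VetCheck vet out) := by unfold Spec_VetCheck; infer_instance

-- ===== CLAIM (what is proved, stated in full; the proofs are below) =====
def Claim_equal_VetCheck : Prop := ∀ (vet : List Int), Dom_VetCheck vet → Spec_VetCheck vet (VetCheck vet)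

-- ===== LEMMAS AND PROOFS =====

-- the common specification: keep x iff it has no later duplicate
def keepLast : List Int → List Int
  | [] => []
  | x :: xs => if x ∈ xs then keepLast xs else x :: keepLast xs

theorem foldl_eq_any (c : Int) (l : List Int) (b : Bool) :
    l.foldl (fun r v => if c = v then true else r) b = (b || l.any (fun v => c == v)) := by
  induction l generalizing b with
  | nil => simp
  | cons y ys ih =>
    simp only [List.foldl_cons, List.any_cons, ih]
    by_cases h : c = y
    · simp [h]
    · rw [if_neg h, beq_eq_false_iff_ne.mpr h]
      simp

theorem innerA_eq (vet : List Int) (k : Nat) :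
    innerA vet (k : Int) = decide (vet.getD k 0 ∈ vet.drop (k + 1)) := by
  unfold innerA
  have hcast : ((k : Int) + 1) = ((k + 1 : Nat) : Int) := by push_cast; ring
  rw [hcast, show ((vet.length : Int)) = PySem.List.len vet by simp [PySem.List.len],
    PySem.List.foldl_pyRange_pyGetD vet 0
      (fun r v => if PySem.List.pyGetD vet (k : Int) 0 = v then true else r) false (by positivity),
    Int.toNat_natCast, foldl_eq_any]
  have hge : PySem.List.pyGetD vet (k : Int) 0 = vet.getD k 0 := by
    simp [PySem.List.pyGetD_natCast]
  rw [hge]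
  by_cases hmem : vet.getD k 0 ∈ vet.drop (k + 1)
  · simp only [decide_eq_true hmem, Bool.false_or, List.any_eq_true]
    exact ⟨_, hmem, beq_self_eq_true _⟩
  · simp only [decide_eq_false hmem, Bool.false_or, List.any_eq_false, beq_iff_eq]
    intro v hv hvq
    exact hmem (hvq ▸ hv)

theorem VetCheck_outer (vet : List Int) : ∀ (k : Nat) (acc : List Int),
    (PySem.List.pyRange (k : Int) vet.length 1).foldl
      (fun vet2 i => if innerA vet i = false then vet2 ++ [PySem.List.pyGetD vet i 0] else vet2)
      acc
    = acc ++ keepLast (vet.drop k) := by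
  intro k
  induction hn : vet.length - k generalizing k with
  | zero =>
    intro acc
    have hk : vet.length ≤ k := by omega
    rw [PySem.List.pyRange_one_eq_nil (by exact_mod_cast hk)]
    simp [List.drop_eq_nil_of_le hk, keepLast]
  | succ n ih =>
    intro acc
    have hk : k < vet.length := by omega
    rw [PySem.List.pyRange_one_cons (by exact_mod_cast hk)]
    simp only [List.foldl_cons]
    rw [innerA_eq vet k]
    have hge : PySem.List.pyGetD vet (k : Int) 0 = vet.getD k 0 := by
      simp [PySem.List.pyGetD_natCast]
    have hcast : ((k : Int) + 1) = ((k + 1 : Nat) : Int) := by push_cast; ring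
    have hdrop : vet.drop k = vet.getD k 0 :: vet.drop (k + 1) := by
      rw [List.getD_eq_getElem?_getD, List.getElem?_eq_getElem hk]
      simp [(List.drop_eq_getElem_cons hk).symm]
    have hmem' : (vet[k]?.getD 0 ∈ vet.drop (k + 1)) ↔ (vet.getD k 0 ∈ vet.drop (k + 1)) := by
      rw [List.getD_eq_getElem?_getD]
    by_cases hmem : vet.getD k 0 ∈ vet.drop (k + 1)
    · rw [decide_eq_true hmem, if_neg (by simp), hcast, ih (k + 1) (by omega) acc, hdrop]
      simp [keepLast, hmem, hmem']
    · rw [decide_eq_false hmem, if_pos rfl, hcast,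
        ih (k + 1) (by omega) (acc ++ [PySem.List.pyGetD vet (k : Int) 0]), hdrop, hge]
      simp only [keepLast, if_neg hmem]
      simp

theorem VetCheck_eq_keepLast (vet : List Int) : VetCheck vet = keepLast vet := by
  unfold VetCheck
  have h0 := VetCheck_outer vet 0 []
  simp only [Nat.cast_zero, List.drop_zero, List.nil_append] at h0
  exact h0

-- dedup relative to already-seen values, as B's loop performs it
def ded (seen : PySem.Set Int) : List Int → List Int
  | [] => []
  | x :: l => if PySem.Set.contains seen x then ded seen l else x :: ded (PySem.Set.add seen x) l

theorem loopB (l : List Int) : ∀ (seen : PySem.Set Int) (out : List Int),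
    (l.foldl
      (fun (st : PySem.Set Int × List Int) x =>
        if PySem.Set.contains st.1 x then st else (PySem.Set.add st.1 x, st.2 ++ [x]))
      (seen, out)).2 = out ++ ded seen l := by
  induction l with
  | nil => intro seen out; simp [ded]
  | cons x l ih =>
    intro seen out
    simp only [List.foldl_cons, ded]
    by_cases h : PySem.Set.contains seen x
    · rw [if_pos h, if_pos h]; exact ih seen out
    · rw [if_neg h, if_neg h, ih (PySem.Set.add seen x) (out ++ [x])]
      simp

theorem contains_iff (s : PySem.Set Int) (x : Int) : PySem.Set.contains s x = true ↔ x ∈ s := by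
  simp [PySem.Set.contains]

theorem ded_snoc (x : Int) : ∀ (l : List Int) (seen : PySem.Set Int),
    ded seen (l ++ [x]) = ded seen l ++ (if x ∈ seen ∨ x ∈ l then [] else [x]) := by
  intro l
  induction l with
  | nil =>
    intro seen
    by_cases h : x ∈ seen <;> simp [ded, h]
  | cons y l ih =>
    intro seen
    simp only [List.cons_append, ded]
    by_cases hy : PySem.Set.contains seen y
    · rw [if_pos hy, if_pos hy, ih seen]
      have hys : y ∈ seen := (contains_iff seen y).mp hy
      by_cases hx : x ∈ seen ∨ x ∈ l
      · rw [if_pos hx, if_pos (by tauto)]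
      · by_cases hxy : x = y
        · subst hxy; rw [if_pos (Or.inl hys), if_pos (Or.inl hys)]
        · rw [if_neg hx, if_neg (by simp only [List.mem_cons]; tauto)]
    · rw [if_neg hy, if_neg hy, ih (PySem.Set.add seen y)]
      congr 1
      have hmem : x ∈ PySem.Set.add seen y ↔ x ∈ seen ∨ x = y := PySem.Set.mem_add seen y x
      by_cases hx : (x ∈ seen ∨ x = y ∨ x ∈ l)
      · rw [if_pos (by rw [hmem]; tauto), if_pos (by simp only [List.mem_cons]; tauto)]
        simp
      · rw [if_neg (by rw [hmem]; tauto), if_neg (by simp only [List.mem_cons]; tauto)]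
        simp

theorem ded_reverse (vet : List Int) : (ded PySem.Set.empty vet.reverse).reverse = keepLast vet := by
  induction vet with
  | nil => simp [ded, keepLast]
  | cons x xs ih =>
    simp only [List.reverse_cons, keepLast]
    rw [ded_snoc x xs.reverse PySem.Set.empty]
    have hempty : (x ∈ (PySem.Set.empty : PySem.Set Int) ∨ x ∈ xs.reverse) ↔ x ∈ xs := by
      simp [PySem.Set.empty]
    by_cases h : x ∈ xs
    · rw [if_pos (hempty.mpr h), if_pos h]; simpa using ih
    · rw [if_neg (fun hc => h (hempty.mp hc)), if_neg h]
      simp only [List.reverse_append, List.reverse_singleton, List.singleton_append]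
      rw [ih]

-- ===== VERDICT (by name: the statement is the Claim_ definition above) =====
theorem VetCheck_spec : Claim_equal_VetCheck := by
  intro vet _
  unfold Spec_VetCheck VetCheck_alt
  rw [VetCheck_eq_keepLast, loopB vet.reverse PySem.Set.empty []]
  simpa using (ded_reverse vet).symm
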